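-- pv_equiv track=rewrite | github.com/HuuDoe/2210CS | Y1-S1/week07/tally_chart.py | candidates_sort_ac_votes
-- ===== SOURCE A (Python) =====
-- def candidates_sort_ac_votes(vote: dict):
--     sorted_vote_result = sorted(vote.values())[::-1]
--     sorted_vote_list = {}
--     for sort_result in sorted_vote_result:
--         for candidate, result in vote.items():
--             if result == sort_result:
--                 sorted_vote_list[candidate] = result
--     return sorted_vote_list
-- ===== SOURCE B (Python) =====
-- def candidates_sort_ac_votes(vote: dict):
--     # One stable keyed sort of the items, descending by vote count, instead of
--     # sorting the values and rescanning the whole dict for every sorted value.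
--     return dict(sorted(vote.items(), key=lambda kv: kv[1], reverse=True))
-- ===== Notes on version B (the rewrite author's own statement) =====
-- stated objective: faster
-- what changed: B does one stable sort of the (candidate, count) items by count descending and builds the dict from it, replacing A's sort-the-values-then-rescan-the-whole-dict-per-sorted-value nested loop.
import Mathlib
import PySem

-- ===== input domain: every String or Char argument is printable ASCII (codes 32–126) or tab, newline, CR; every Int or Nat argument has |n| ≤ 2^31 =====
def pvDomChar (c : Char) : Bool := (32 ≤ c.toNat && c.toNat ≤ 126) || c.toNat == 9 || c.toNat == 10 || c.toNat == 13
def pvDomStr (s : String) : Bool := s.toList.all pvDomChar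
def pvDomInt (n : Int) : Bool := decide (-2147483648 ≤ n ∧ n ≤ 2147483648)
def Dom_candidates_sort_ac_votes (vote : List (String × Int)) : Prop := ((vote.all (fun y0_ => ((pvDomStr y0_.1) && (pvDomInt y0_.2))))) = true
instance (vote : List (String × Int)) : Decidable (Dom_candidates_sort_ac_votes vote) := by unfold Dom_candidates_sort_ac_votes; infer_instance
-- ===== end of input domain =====

-- B replaces A's sort-the-values-then-rescan-the-dict-per-sorted-value nested loop by a
-- single stable sort of the items by count descending (objective: faster).

-- ===== PORT A =====
def candidates_sort_ac_votes (vote : List (String × Int)) : List (String × Int) :=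
  -- sorted_vote_result = sorted(vote.values())[::-1]   (xs[::-1] is slice? with step -1, always `some`)
  let sorted_vote_result : List Int :=
    (PySem.List.slice? (PySem.List.sorted (vote.map Prod.snd) (fun v => v)) none none (-1)).getD []
  -- for sort_result in sorted_vote_result: for candidate, result in vote.items(): if result == sort_result: sorted_vote_list[candidate] = result
  let sorted_vote_list : PySem.Dict String Int :=
    sorted_vote_result.foldl (fun d sort_result =>
      vote.foldl (fun d p => if p.2 == sort_result then d.insert p.1 p.2 else d) d)
      PySem.Dict.empty
  sorted_vote_list.items

-- ===== PORT B =====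
def candidates_sort_ac_votes_alt (vote : List (String × Int)) : List (String × Int) :=
  (PySem.Dict.ofList (PySem.List.sorted vote (fun kv => kv.2) true)).items

-- ===== PRECONDITION & SPEC =====
-- Pre_ excludes association lists with duplicate keys: they do not represent any Python
-- dict (A's parameter is a dict, whose keys are necessarily distinct).
def Pre_candidates_sort_ac_votes (vote : List (String × Int)) : Prop := (vote.map Prod.fst).Nodup
instance (vote : List (String × Int)) : Decidable (Pre_candidates_sort_ac_votes vote) := by unfold Pre_candidates_sort_ac_votes; infer_instance
def pvWitness_candidates_sort_ac_votes : (List (String × Int)) := [("ann", 2), ("bob", 5), ("cat", 2)]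
def Spec_candidates_sort_ac_votes (vote : List (String × Int)) (out : List (String × Int)) : Prop := out = candidates_sort_ac_votes_alt vote
instance (vote : List (String × Int)) (out : List (String × Int)) : Decidable (Spec_candidates_sort_ac_votes vote out) := by unfold Spec_candidates_sort_ac_votes; infer_instance

-- ===== CLAIM (what is proved, stated in full; the proofs are below) =====
def Claim_equal_candidates_sort_ac_votes : Prop := ∀ (vote : List (String × Int)), Dom_candidates_sort_ac_votes vote → Pre_candidates_sort_ac_votes vote → Spec_candidates_sort_ac_votes vote (candidates_sort_ac_votes vote)

-- ===== LEMMAS AND PROOFS =====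

def pvFl (l : List (String × Int)) (v : Int) : List (String × Int) := l.filter (fun p => p.2 == v)

def pvInsVal (w : Int) : List Int → List Int
  | [] => [w]
  | v :: vs => if v < w then w :: v :: vs else if w = v then v :: vs else v :: pvInsVal w vs

def pvDvals (l : List (String × Int)) : List Int := l.foldl (fun vs p => pvInsVal p.2 vs) []

theorem pv_mem_insVal (w u : Int) (vs : List Int) : u ∈ pvInsVal w vs ↔ u = w ∨ u ∈ vs := by
  induction vs with
  | nil => simp [pvInsVal]
  | cons v vs ih =>
    simp only [pvInsVal]
    split_ifs with h1 h2
    · simp only [List.mem_cons]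
    · subst h2; simp only [List.mem_cons]; tauto
    · simp only [List.mem_cons, ih]; tauto

theorem pv_insVal_pairwise (w : Int) (vs : List Int) (h : vs.Pairwise (fun a b => b < a)) :
    (pvInsVal w vs).Pairwise (fun a b => b < a) := by
  induction vs with
  | nil => simp [pvInsVal]
  | cons v vs ih =>
    rw [List.pairwise_cons] at h
    simp only [pvInsVal]
    split_ifs with h1 h2
    · refine List.Pairwise.cons ?_ (List.Pairwise.cons h.1 h.2)
      intro u hu
      rcases List.mem_cons.1 hu with rfl | hu
      · exact h1
      · exact lt_trans (h.1 u hu) h1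
    · exact List.Pairwise.cons h.1 h.2
    · refine List.Pairwise.cons ?_ (ih h.2)
      intro u hu
      rcases (pv_mem_insVal w u vs).1 hu with rfl | hu
      · omega
      · exact h.1 u hu

theorem pv_insertBy_append (before : (String × Int) → (String × Int) → Bool) (x : String × Int)
    (ys zs : List (String × Int)) (h : ∀ y ∈ ys, before x y = false) :
    PySem.List.insertBy before x (ys ++ zs) = ys ++ PySem.List.insertBy before x zs := by
  induction ys with
  | nil => rfl
  | cons y ys ih =>
    have hy : before x y = false := h y (by simp)
    simp only [List.cons_append, PySem.List.insertBy, hy]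
    simp [ih (fun y hy => h y (by simp [hy]))]
theorem pv_insertBy_front (before : (String × Int) → (String × Int) → Bool) (x : String × Int)
    (zs : List (String × Int)) (h : ∀ q ∈ zs, before x q = true) :
    PySem.List.insertBy before x zs = x :: zs := by
  cases zs with
  | nil => rfl
  | cons q t => simp [PySem.List.insertBy, h q (by simp)]
theorem pv_fl_append (l : List (String × Int)) (x : String × Int) (v : Int) :
    pvFl (l ++ [x]) v = pvFl l v ++ if x.2 == v then [x] else [] := by
  simp only [pvFl, List.filter_append, List.filter_cons, List.filter_nil]
theorem pv_mem_of_mem_fl {l : List (String × Int)} {v : Int} {q : String × Int}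
    (h : q ∈ pvFl l v) : q ∈ l ∧ q.2 = v := by
  simp only [pvFl, List.mem_filter, beq_iff_eq] at h; exact h
theorem pv_fl_nil {l : List (String × Int)} {v : Int} (h : ∀ p ∈ l, p.2 ≠ v) : pvFl l v = [] := by
  simp only [pvFl, List.filter_eq_nil_iff, beq_iff_eq]; exact h

theorem pv_ins (vs : List Int) (l : List (String × Int)) (x : String × Int)
    (hp : vs.Pairwise (fun a b => b < a))
    (hmem : ∀ p ∈ l, p.2 = x.2 → x.2 ∈ vs) :
    PySem.List.insertBy (fun a b => decide (b.2 < a.2)) x (vs.flatMap (pvFl l))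
      = (pvInsVal x.2 vs).flatMap (pvFl (l ++ [x])) := by
  induction vs with
  | nil =>
    have h0 : pvFl l x.2 = [] := pv_fl_nil (fun p hp hv => by simpa using hmem p hp hv)
    simp [pvInsVal, PySem.List.insertBy, pv_fl_append, h0]
  | cons v vs ih =>
    rw [List.pairwise_cons] at hp
    rcases lt_trichotomy v x.2 with hlt | heq | hgt
    · -- x.2 bigger than everything: goes in front, fresh group
      have hnotin : x.2 ∉ v :: vs := by
        intro hmemv
        rcases List.mem_cons.1 hmemv with h | h
        · omega
        · have := hp.1 _ h; omega
      have h0 : pvFl l x.2 = [] := pv_fl_nil (fun p hpl hv => (hnotin (hmem p hpl hv)))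
      have hfront : PySem.List.insertBy (fun a b => decide (b.2 < a.2)) x ((v :: vs).flatMap (pvFl l))
          = x :: (v :: vs).flatMap (pvFl l) := by
        apply pv_insertBy_front
        intro q hq
        rcases List.mem_flatMap.1 hq with ⟨a, ha, hqa⟩
        have h2 := (pv_mem_of_mem_fl hqa).2
        rcases List.mem_cons.1 ha with rfl | h
        · simp [h2]; omega
        · have := hp.1 _ h; simp [h2]; omega
      have hcongr : ∀ v' ∈ v :: vs, pvFl (l ++ [x]) v' = pvFl l v' := by
        intro v' hv'
        rw [pv_fl_append]
        have : (x.2 == v') = false := by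
          simp only [beq_eq_false_iff_ne]; intro h; exact hnotin (h ▸ hv')
        simp [this]
      rw [hfront]
      simp only [pvInsVal, if_pos hlt, List.flatMap_cons]
      rw [pv_fl_append, h0, hcongr v (by simp), List.flatMap_congr (fun a ha => hcongr a (by simp [ha]))]
      simp
    · -- x.2 = v : x is appended at the end of v's group
      have hskip : PySem.List.insertBy (fun a b => decide (b.2 < a.2)) x ((v :: vs).flatMap (pvFl l))
          = pvFl l v ++ PySem.List.insertBy (fun a b => decide (b.2 < a.2)) x (vs.flatMap (pvFl l)) := by
        rw [List.flatMap_cons]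
        apply pv_insertBy_append
        intro y hy
        have h2 := (pv_mem_of_mem_fl hy).2
        simp [h2, heq]
      have hfront : PySem.List.insertBy (fun a b => decide (b.2 < a.2)) x (vs.flatMap (pvFl l))
          = x :: vs.flatMap (pvFl l) := by
        apply pv_insertBy_front
        intro q hq
        rcases List.mem_flatMap.1 hq with ⟨a, ha, hqa⟩
        have h2 := (pv_mem_of_mem_fl hqa).2
        have := hp.1 _ ha
        simp [h2]; omega
      have hcongr : ∀ v' ∈ vs, pvFl (l ++ [x]) v' = pvFl l v' := by
        intro v' hv'
        rw [pv_fl_append]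
        have := hp.1 _ hv'
        have : (x.2 == v') = false := by simp only [beq_eq_false_iff_ne]; omega
        simp [this]
      rw [hskip, hfront]
      have hnv : ¬ v < x.2 := by omega
      simp only [pvInsVal, if_neg hnv, if_pos heq.symm, List.flatMap_cons]
      rw [pv_fl_append, List.flatMap_congr hcongr]
      simp [heq]
    · -- x.2 < v : skip v's group and recurse
      have hskip : PySem.List.insertBy (fun a b => decide (b.2 < a.2)) x ((v :: vs).flatMap (pvFl l))
          = pvFl l v ++ PySem.List.insertBy (fun a b => decide (b.2 < a.2)) x (vs.flatMap (pvFl l)) := by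
        rw [List.flatMap_cons]
        apply pv_insertBy_append
        intro y hy
        have h2 := (pv_mem_of_mem_fl hy).2
        simp [h2]; omega
      have hmem' : ∀ p ∈ l, p.2 = x.2 → x.2 ∈ vs := by
        intro p hpl hv
        rcases List.mem_cons.1 (hmem p hpl hv) with h | h
        · omega
        · exact h
      rw [hskip, ih hp.2 hmem']
      have hnv : ¬ v < x.2 := by omega
      have hne : ¬ x.2 = v := by omega
      simp only [pvInsVal, if_neg hnv, if_neg hne, List.flatMap_cons]
      have : pvFl (l ++ [x]) v = pvFl l v := by
        rw [pv_fl_append]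
        have : (x.2 == v) = false := by simp only [beq_eq_false_iff_ne]; omega
        simp [this]
      rw [this]

theorem pv_main (l : List (String × Int)) :
    (PySem.List.sorted l (fun p => p.2) true = (pvDvals l).flatMap (pvFl l)) ∧
    (pvDvals l).Pairwise (fun a b => b < a) ∧
    (∀ v ∈ pvDvals l, pvFl l v ≠ []) ∧
    (∀ p ∈ l, p.2 ∈ pvDvals l) := by
  induction l using List.reverseRecOn with
  | nil => refine ⟨?_, ?_, ?_, ?_⟩ <;> simp [pvDvals, PySem.List.sorted_rev_eq_foldl_insertBy]
  | append_singleton u x ih =>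
    have hd : pvDvals (u ++ [x]) = pvInsVal x.2 (pvDvals u) := by
      simp [pvDvals, List.foldl_append]
    have hmem : ∀ p ∈ u, p.2 = x.2 → x.2 ∈ pvDvals u := by
      intro p hp hv; have := ih.2.2.2 p hp; rwa [hv] at this
    refine ⟨?_, ?_, ?_, ?_⟩
    · rw [PySem.List.sorted_rev_eq_foldl_insertBy, List.foldl_append]
      simp only [List.foldl_cons, List.foldl_nil]
      rw [← PySem.List.sorted_rev_eq_foldl_insertBy, ih.1,
        pv_ins _ _ _ ih.2.1 hmem, hd]
    · rw [hd]; exact pv_insVal_pairwise _ _ ih.2.1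
    · rw [hd]
      intro v hv
      rcases (pv_mem_insVal x.2 v (pvDvals u)).1 hv with rfl | hv
      · rw [pv_fl_append]; simp
      · rw [pv_fl_append]
        have := ih.2.2.1 v hv
        intro hcon
        rcases List.append_eq_nil_iff.1 hcon with ⟨h1, _⟩
        exact this h1
    · rw [hd]
      intro p hp
      rcases List.mem_append.1 hp with h | h
      · exact (pv_mem_insVal x.2 p.2 (pvDvals u)).2 (Or.inr (ih.2.2.2 p h))
      · have : p = x := by simpa using h
        subst this
        exact (pv_mem_insVal p.2 p.2 (pvDvals u)).2 (Or.inl rfl)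

-- key injectivity on a nodup-key vote
theorem pv_key_inj {vote : List (String × Int)} (hv : (vote.map Prod.fst).Nodup)
    {p q : String × Int} (hp : p ∈ vote) (hq : q ∈ vote) (h : p.1 = q.1) : p = q :=
  List.inj_on_of_nodup_map hv hp hq h

-- a dict whose items are the key-nodup grouped pairs has nodup keys
theorem pv_group_keys_nodup {vote : List (String × Int)} (hv : (vote.map Prod.fst).Nodup)
    {seen : List Int} (hs : seen.Nodup) :
    ((seen.flatMap (pvFl vote)).map Prod.fst).Nodup := by
  rw [List.map_flatMap, List.nodup_flatMap]
  constructor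
  · intro v hvs
    exact List.Nodup.sublist (List.Sublist.map _ (List.filter_sublist (l := vote))) hv
  · rw [List.Nodup] at hs
    rw [List.pairwise_iff_forall_sublist] at hs ⊢
    intro v w hsub
    have hvw : v ≠ w := hs hsub
    intro k hk1 hk2
    rcases List.mem_map.1 hk1 with ⟨p, hp, rfl⟩
    rcases List.mem_map.1 hk2 with ⟨q, hq, hpq⟩
    have hp2 := pv_mem_of_mem_fl hp
    have hq2 := pv_mem_of_mem_fl hq
    have := pv_key_inj hv hp2.1 hq2.1 hpq.symm
    subst this
    exact hvw (hp2.2.symm.trans hq2.2)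

theorem pv_insert_self {d : PySem.Dict String Int} {k : String} {v : Int}
    (hn : d.keys.Nodup) (h : d.get? k = some v) : d.insert k v = d := by
  have hc : d.contains k = true := by
    rw [PySem.Dict.contains_eq_isSome_get?, h]; rfl
  apply PySem.Dict.ext
  rw [PySem.Dict.items_insert_of_contains d v hc]
  conv_rhs => rw [← List.map_id d.items]
  apply List.map_congr_left
  intro p hp
  by_cases hk : p.1 = k
  · have := PySem.Dict.get?_of_mem_items d (k := p.1) (v := p.2) hp hn
    rw [hk, h] at this
    have hv : p.2 = v := by injection this with h2; exact h2.symm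
    simp only [hk, BEq.rfl, if_pos, id_eq]
    exact Prod.ext hk.symm hv.symm
  · simp [hk]

theorem pv_noop_fold {d : PySem.Dict String Int} {l : List (String × Int)}
    (hn : d.keys.Nodup) (h : ∀ p ∈ l, d.get? p.1 = some p.2) :
    l.foldl (fun d p => d.insert p.1 p.2) d = d := by
  induction l with
  | nil => rfl
  | cons p l ih =>
    simp only [List.foldl_cons]
    rw [pv_insert_self hn (h p (by simp)), ih (fun q hq => h q (by simp [hq]))]

theorem pv_inner_filter (sr : Int) (l : List (String × Int)) (d : PySem.Dict String Int) :
    l.foldl (fun d p => if p.2 == sr then d.insert p.1 p.2 else d) d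
      = (pvFl l sr).foldl (fun d p => d.insert p.1 p.2) d := by
  induction l generalizing d with
  | nil => rfl
  | cons p l ih =>
    simp only [List.foldl_cons, pvFl, List.filter_cons]
    by_cases h : (p.2 == sr) = true
    · simp only [h, if_pos]; rw [ih]; rfl
    · simp only [h]; rw [ih]; simp; rfl

theorem pv_outer (vote : List (String × Int)) (hv : (vote.map Prod.fst).Nodup)
    (vs : List Int) : ∀ (seen : List Int) (d : PySem.Dict String Int),
    seen.Nodup →
    d.items = seen.flatMap (pvFl vote) →
    (vs.foldl (fun d sr => vote.foldl (fun d p => if p.2 == sr then d.insert p.1 p.2 else d) d) d).items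
      = (PySem.Set.update seen vs).flatMap (pvFl vote) := by
  induction vs with
  | nil =>
    intro seen d hs hitems
    rw [List.foldl_nil, PySem.Set.update_nil, hitems]
  | cons v vs ih =>
    intro seen d hs hitems
    have hn : d.keys.Nodup := by
      have : d.keys = d.items.map Prod.fst := rfl
      rw [this, hitems]
      exact pv_group_keys_nodup hv hs
    rw [List.foldl_cons, PySem.Set.update_cons]
    by_cases hvseen : v ∈ seen
    · have hadd : PySem.Set.add seen v = seen := by
        simp [PySem.Set.add, PySem.Set.contains, hvseen]
      have hget : ∀ p ∈ pvFl vote v, d.get? p.1 = some p.2 := by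
        intro p hp
        have hmem : (p.1, p.2) ∈ d.items := by
          rw [hitems]
          exact List.mem_flatMap.2 ⟨v, hvseen, by simpa using hp⟩
        exact PySem.Dict.get?_of_mem_items d hmem hn
      rw [pv_inner_filter, pv_noop_fold hn hget, hadd]
      exact ih seen d hs hitems
    · have hadd : PySem.Set.add seen v = seen ++ [v] := by
        simp only [PySem.Set.add, PySem.Set.contains]
        have hcf : seen.contains v = false := by
          simpa using hvseen
        simp [hvseen]
      have hfresh : ∀ a ∈ pvFl vote v, d.contains a.1 = false := by
        intro a ha
        by_contra hcon
        have hc : d.contains a.1 = true := by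
          cases h : d.contains a.1
          · exact absurd h hcon
          · rfl
        have hk : a.1 ∈ d.keys := (PySem.Dict.contains_iff_mem_keys d a.1).1 hc
        have : d.keys = d.items.map Prod.fst := rfl
        rw [this, hitems] at hk
        rcases List.mem_map.1 hk with ⟨q, hq, hq1⟩
        rcases List.mem_flatMap.1 hq with ⟨v', hv', hqv'⟩
        have hq2 := pv_mem_of_mem_fl hqv'
        have ha2 := pv_mem_of_mem_fl ha
        have : q = a := pv_key_inj hv hq2.1 ha2.1 hq1
        subst this
        rw [ha2.2] at hq2
        exact hvseen (hq2.2 ▸ hv')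
      have hnodup : ((pvFl vote v).map (fun a => a.1)).Nodup := by
        exact List.Nodup.sublist (List.Sublist.map _ (List.filter_sublist (l := vote))) hv
      have hitems' : (List.foldl (fun d p => d.insert p.1 p.2) d (pvFl vote v)).items
          = (seen ++ [v]).flatMap (pvFl vote) := by
        rw [PySem.Dict.items_foldl_insert_fresh (pvFl vote v) (fun a => a.1) (fun a => a.2) d hfresh hnodup,
          hitems, List.flatMap_append]
        simp [Prod.mk.eta]
      have hs' : (seen ++ [v]).Nodup := by
        simp [List.nodup_append, hs]
        intro a ha hav
        exact hvseen (hav ▸ ha)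
      rw [pv_inner_filter, hadd]
      exact ih (seen ++ [v]) _ hs' hitems'

theorem pv_ofList_sublist (xs : List Int) : (PySem.Set.ofList xs).Sublist xs := by
  induction xs using List.reverseRecOn with
  | nil => simp [PySem.Set.ofList, PySem.Set.empty]
  | append_singleton u x ih =>
    rw [PySem.Set.ofList_append, PySem.Set.update_cons, PySem.Set.update_nil]
    simp only [PySem.Set.add]
    split
    · exact ih.trans (List.sublist_append_left u [x])
    · exact List.Sublist.append ih (List.Sublist.refl [x])

theorem pv_dvals_mem (l : List (String × Int)) (y : Int) :
    y ∈ pvDvals l ↔ y ∈ l.map Prod.snd := by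
  constructor
  · intro h
    have hne := (pv_main l).2.2.1 y h
    rcases List.exists_mem_of_ne_nil _ hne with ⟨p, hp⟩
    have := pv_mem_of_mem_fl hp
    exact List.mem_map.2 ⟨p, this.1, this.2⟩
  · intro h
    rcases List.mem_map.1 h with ⟨p, hp, rfl⟩
    exact (pv_main l).2.2.2 p hp

theorem pv_dvals_nodup (l : List (String × Int)) : (pvDvals l).Nodup :=
  List.Pairwise.imp (fun h => (ne_of_gt h)) (pv_main l).2.1

-- the distinct values of l, read off the reversed ascending sort, are pvDvals l
theorem pv_ofList_rev_sorted (l : List (String × Int)) :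
    PySem.Set.ofList ((PySem.List.sorted (l.map Prod.snd) (fun v => v)).reverse) = pvDvals l := by
  set svr := (PySem.List.sorted (l.map Prod.snd) (fun v => v)).reverse with hsvr
  have hpair : svr.Pairwise (fun a b => b ≤ a) := by
    rw [hsvr, List.pairwise_reverse]
    exact PySem.List.sorted_pairwise (l.map Prod.snd) (fun v => v)
  have hofpair : (PySem.Set.ofList svr).Pairwise (fun a b => b < a) := by
    have h1 : (PySem.Set.ofList svr).Pairwise (fun a b => b ≤ a) :=
      List.Pairwise.sublist (pv_ofList_sublist svr) hpair
    have h2 : (PySem.Set.ofList svr).Pairwise (fun a b => a ≠ b) := PySem.Set.nodup_ofList svr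
    exact (h1.and h2).imp (fun h => lt_of_le_of_ne h.1 (Ne.symm h.2))
  have hmemeq : ∀ y, y ∈ PySem.Set.ofList svr ↔ y ∈ pvDvals l := by
    intro y
    rw [PySem.Set.mem_ofList, pv_dvals_mem, hsvr, List.mem_reverse, PySem.List.mem_sorted]
  have hperm : (pvDvals l).Perm (PySem.Set.ofList svr) :=
    (List.perm_ext_iff_of_nodup (pv_dvals_nodup l) (PySem.Set.nodup_ofList svr)).2
      (fun y => (hmemeq y).symm)
  have h1 : PySem.List.sorted (PySem.Set.ofList svr) (fun x => x) true = pvDvals l :=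
    PySem.List.sorted_rev_eq_of_perm_of_pairwise_gt _ _ _ hperm (pv_main l).2.1
  have h2 : PySem.List.sorted (PySem.Set.ofList svr) (fun x => x) true = PySem.Set.ofList svr :=
    PySem.List.sorted_rev_eq_of_perm_of_pairwise_gt _ _ _ (List.Perm.refl _) hofpair
  rw [← h1, h2]


theorem pv_equal (vote : List (String × Int)) (hv : (vote.map Prod.fst).Nodup) : candidates_sort_ac_votes vote = candidates_sort_ac_votes_alt vote := by
  have hB : candidates_sort_ac_votes_alt vote = PySem.List.sorted vote (fun kv => kv.2) true := by
    have hnodup : ((PySem.List.sorted vote (fun kv => kv.2) true).map (fun a => a.1)).Nodup := by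
      have hperm := (PySem.List.sorted_perm vote (fun kv => kv.2) true).map (fun a => a.1)
      exact hperm.nodup_iff.2 hv
    show (PySem.Dict.empty.update (PySem.List.sorted vote (fun kv => kv.2) true)).items = _
    show ((PySem.List.sorted vote (fun kv => kv.2) true).foldl
      (fun acc p => acc.insert p.1 p.2) PySem.Dict.empty).items = _
    rw [PySem.Dict.items_foldl_insert_fresh (PySem.List.sorted vote (fun kv => kv.2) true)
      (fun a : String × Int => a.1) (fun a : String × Int => a.2) PySem.Dict.empty
      (fun a _ => PySem.Dict.contains_empty a.1) hnodup]
    simp [PySem.Dict.empty]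
  have hA : candidates_sort_ac_votes vote = ((((PySem.List.sorted (vote.map Prod.snd) (fun v => v)).reverse)).foldl
      (fun d sr => vote.foldl (fun d p => if p.2 == sr then d.insert p.1 p.2 else d) d)
      PySem.Dict.empty).items := by
    unfold candidates_sort_ac_votes
    rw [PySem.List.slice?_none_none_neg_one]
    rfl
  rw [hA, hB,
    pv_outer vote hv _ [] PySem.Dict.empty List.nodup_nil (by rfl),
    show PySem.Set.update [] ((PySem.List.sorted (vote.map Prod.snd) (fun v => v)).reverse)
        = PySem.Set.ofList ((PySem.List.sorted (vote.map Prod.snd) (fun v => v)).reverse)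
      from PySem.Set.update_empty _,
    pv_ofList_rev_sorted vote, ← (pv_main vote).1]

-- ===== VERDICT (by name: the statement is the Claim_ definition above) =====
theorem candidates_sort_ac_votes_spec : Claim_equal_candidates_sort_ac_votes := by
  intro vote _ hpre
  unfold Spec_candidates_sort_ac_votes
  exact pv_equal vote hpre
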